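-- pv_equiv track=rewrite | github.com/CruiserClyde/TIPE-PROJECT | TIPE.py | liste_variable
-- ===== SOURCE A (Python) =====
-- def liste_variable(liste):# cette fonction retourne la liste des temps possibles par rapport à la longueur d'une liste en entrée
--     tempspossible = [6,12,18,24]
--     lon = len(liste)
--     for k in range(len(tempspossible)):
--         if tempspossible[k] >= lon and lon > tempspossible[0]:
--             l = (tempspossible[:k])
--             return(l)
--         else:
--             if lon > tempspossible[-1]:
--                 return(tempspossible) #si la longueur de la liste est supérieur à 24 on peut au moin stocker 24 notes dans une
--             if lon <= tempspossible[0] and lon >= 6:     #certaine sous liste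
--                 return([2,4,6])
--             if lon < 6 and lon >= 4:
--                 return([2,4])
--             if lon < 4 and lon >1:
--                 return([2])
--             if lon == 1:
--                 return([1]) #lorsque la longueur de la liste est 1 on ne peut pas découper plus que l'élément restant
-- ===== SOURCE B (Python) =====
-- from bisect import bisect_left
--
-- _BREAKS = [1, 3, 5, 6, 12, 18, 24]
-- _OUTS = [[1], [2], [2, 4], [2, 4, 6], [6], [6, 12], [6, 12, 18], [6, 12, 18, 24]]
--
--
-- def liste_variable(liste):
--     lon = len(liste)
--     if lon == 0:
--         return None
--     return list(_OUTS[bisect_left(_BREAKS, lon)])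
-- ===== Notes on version B (the rewrite author's own statement) =====
-- stated objective: simpler
-- what changed: Replaces A's loop over tempspossible with its nested conditional cascade by a single table lookup: bisect_left on a sorted breakpoint list selects the answer directly.
import Mathlib
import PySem

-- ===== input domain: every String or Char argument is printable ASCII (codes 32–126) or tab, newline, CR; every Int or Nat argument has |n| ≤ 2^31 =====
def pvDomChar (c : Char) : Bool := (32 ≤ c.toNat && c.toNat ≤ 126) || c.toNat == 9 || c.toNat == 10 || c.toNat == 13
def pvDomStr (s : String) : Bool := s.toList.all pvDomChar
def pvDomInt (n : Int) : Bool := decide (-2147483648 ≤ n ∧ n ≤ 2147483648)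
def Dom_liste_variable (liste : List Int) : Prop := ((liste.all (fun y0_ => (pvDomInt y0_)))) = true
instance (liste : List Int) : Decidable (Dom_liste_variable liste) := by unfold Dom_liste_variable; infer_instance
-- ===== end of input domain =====

-- B replaces A's loop-plus-conditional cascade with a breakpoint table consulted by binary search (objective: simpler).

-- ===== PORT A =====
-- the 'for k in range(...)' loop with early returns, as recursion over the index list
def liste_variable_go (tempspossible : List Int) (lon : Int) : List Int → Option (List Int)
  | [] => none
  | k :: ks =>
    if PySem.List.pyGetD tempspossible k 0 ≥ lon ∧ lon > PySem.List.pyGetD tempspossible 0 0 then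
      some (PySem.List.slice tempspossible none (some k))
    else if lon > PySem.List.pyGetD tempspossible (-1) 0 then
      some tempspossible
    else if lon ≤ PySem.List.pyGetD tempspossible 0 0 ∧ lon ≥ 6 then
      some [2, 4, 6]
    else if lon < 6 ∧ lon ≥ 4 then
      some [2, 4]
    else if lon < 4 ∧ lon > 1 then
      some [2]
    else if lon = 1 then
      some [1]
    else
      liste_variable_go tempspossible lon ks

def liste_variable (liste : List Int) : List Int :=
  let tempspossible : List Int := [6, 12, 18, 24]
  let lon : Int := liste.length
  (liste_variable_go tempspossible lon
      (PySem.List.pyRange 0 (tempspossible.length : Int) 1)).getD []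

-- ===== PORT B =====
def liste_variable_alt (liste : List Int) : List Int :=
  let lon : Int := liste.length
  if lon = 0 then []  -- Python B returns None here; excluded by Pre_
  else
    let breaks : List Int := [1, 3, 5, 6, 12, 18, 24]
    let outs : List (List Int) := [[1], [2], [2, 4], [2, 4, 6], [6], [6, 12], [6, 12, 18], [6, 12, 18, 24]]
    PySem.List.pyGetD outs ((PySem.List.bisectLeft breaks lon : Nat) : Int) []

-- ===== PRECONDITION & SPEC =====
-- Pre_ excludes only the empty list: there A falls off its loop and returns None, not a list.
def Pre_liste_variable (liste : List Int) : Prop := liste ≠ []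
instance (liste : List Int) : Decidable (Pre_liste_variable liste) := by unfold Pre_liste_variable; infer_instance
def pvWitness_liste_variable : List Int := ([3])

def Spec_liste_variable (liste : List Int) (out : List Int) : Prop := out = liste_variable_alt liste
instance (liste : List Int) (out : List Int) : Decidable (Spec_liste_variable liste out) := by unfold Spec_liste_variable; infer_instance

-- ===== CLAIM (what is proved, stated in full; the proofs are below) =====
def Claim_equal_liste_variable : Prop := ∀ (liste : List Int), Dom_liste_variable liste → Pre_liste_variable liste → Spec_liste_variable liste (liste_variable liste)

-- ===== LEMMAS AND PROOFS =====

-- both ports depend on the input only through its length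
theorem lv_length (n : Nat) (h : 1 ≤ n) :
    (liste_variable_go [6, 12, 18, 24] (n : Int)
        (PySem.List.pyRange 0 4 1)).getD [] =
      PySem.List.pyGetD [[1], [2], [2, 4], [2, 4, 6], [6], [6, 12], [6, 12, 18], [6, 12, 18, 24]]
        ((PySem.List.bisectLeft [1, 3, 5, 6, 12, 18, 24] (n : Int) : Nat) : Int) [] := by
  by_cases hle : n ≤ 25
  · interval_cases n <;> decide
  · -- n ≥ 26: A returns tempspossible at k = 0, B's bisect lands past every breakpoint
    have h26 : (26 : Int) ≤ (n : Int) := by exact_mod_cast (by omega : 26 ≤ n)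
    have hrng : PySem.List.pyRange 0 4 1 = ([0, 1, 2, 3] : List Int) := by decide
    rw [hrng]
    have hbl : PySem.List.bisectLeft [1, 3, 5, 6, 12, 18, 24] (n : Int) = 7 := by
      obtain ⟨hle7, _, hge⟩ :=
        PySem.List.bisectLeft_spec [1, 3, 5, 6, 12, 18, 24] (n : Int) (by decide)
      simp only [List.length_cons, List.length_nil] at hle7 hge
      by_contra hne
      have hlt : PySem.List.bisectLeft [1, 3, 5, 6, 12, 18, 24] (n : Int) < 7 := by omega
      have hx := hge _ hlt (le_refl _)
      have hall : ∀ (j : Nat) (hj : j < 7), ([1, 3, 5, 6, 12, 18, 24] : List Int)[j] ≤ 24 := by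
        intro j hj; interval_cases j <;> norm_num
      have := hall _ hlt
      omega
    rw [hbl]
    simp only [liste_variable_go]
    have c1 : ¬ (PySem.List.pyGetD ([6, 12, 18, 24] : List Int) (0 : Int) 0 ≥ (n : Int) ∧
        (n : Int) > PySem.List.pyGetD ([6, 12, 18, 24] : List Int) 0 0) := by
      simp [PySem.List.pyGetD, PySem.List.pyGet?, PySem.List.pyIdx?]
    have c2 : (n : Int) > PySem.List.pyGetD ([6, 12, 18, 24] : List Int) (-1) 0 := by
      simp [PySem.List.pyGetD, PySem.List.pyGet?, PySem.List.pyIdx?]; omega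
    rw [if_neg c1, if_pos c2]
    decide

-- ===== VERDICT (by name: the statement is the Claim_ definition above) =====
theorem liste_variable_spec : Claim_equal_liste_variable := by
  intro liste _ hpre
  unfold Spec_liste_variable liste_variable liste_variable_alt
  have hn : 1 ≤ liste.length := by
    cases liste with
    | nil => exact absurd rfl hpre
    | cons a t => simp
  have hne : ((liste.length : Int)) ≠ 0 := by
    simpa using (by omega : ¬ (liste.length = 0))
  simp only [List.length_cons, List.length_nil]
  rw [if_neg hne]
  exact lv_length liste.length hn
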